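-- pv_equiv track=rewrite | github.com/sunshine-biscuit/love-machine | quiz.py | _score_from_answers
-- ===== SOURCE A (Python) =====
-- from collections import defaultdict
--
-- def _score_from_answers(answers):
--     scores = defaultdict(int)
--     for weights in answers:
--         for k, v in weights.items():
--             scores[k] += v
--     if not scores:
--         return "REALIST"
--     top = sorted(scores.items(), key=lambda kv: (-kv[1], kv[0]))[0][0]
--     return top
-- ===== SOURCE B (Python) =====
-- def _score_from_answers(answers):
--     pairs = [kv for weights in answers for kv in weights.items()]
--     if not pairs:
--         return "REALIST"
--
--     def total(key):
--         return sum(v for k, v in pairs if k == key)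
--
--     best = max(total(k) for k, _ in pairs)
--     return min(k for k, _ in pairs if total(k) == best)
-- ===== Notes on version B (the rewrite author's own statement) =====
-- stated objective: alternative
-- what changed: Drops the defaultdict aggregation and the (-value, key) sort entirely: B flattens the answers into a pair list, re-sums each key's weights on demand with a brute-force scan, takes the maximal total with a plain max(), then returns the smallest key achieving it with a plain min() — two staged passes with no dict and no tuple comparator, trading the O(N + M log M) dict-and-sort for an O(N^2) re-scan.
import Mathlib
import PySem

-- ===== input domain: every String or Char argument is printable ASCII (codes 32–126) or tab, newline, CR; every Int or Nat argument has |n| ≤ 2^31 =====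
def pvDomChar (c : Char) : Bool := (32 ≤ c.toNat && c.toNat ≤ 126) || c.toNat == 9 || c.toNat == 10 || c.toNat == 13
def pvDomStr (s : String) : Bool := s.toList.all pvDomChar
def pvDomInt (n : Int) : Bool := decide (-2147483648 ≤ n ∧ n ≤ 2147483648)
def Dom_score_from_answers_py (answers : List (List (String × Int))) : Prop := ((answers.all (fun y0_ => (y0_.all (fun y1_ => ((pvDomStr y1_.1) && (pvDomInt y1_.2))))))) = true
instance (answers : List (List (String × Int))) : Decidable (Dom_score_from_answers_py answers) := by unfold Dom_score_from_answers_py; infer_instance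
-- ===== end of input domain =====

-- B drops the dict aggregation and the (-value, key) comparator: it flattens the answers, re-sums each
-- key's weights on demand, takes the maximal total, then the smallest key achieving it; equal returns proved.

-- ===== PORT A =====
-- scores = defaultdict(int); scores[k] += v  →  Dict.modify k 0 (· + v)
-- sorted(scores.items(), key=lambda kv: (-kv[1], kv[0]))[0][0]; the [0] is guarded by the emptiness test, so headD's default is unreachable
def score_from_answers_py (answers : List (List (String × Int))) : String :=
  let scores : PySem.Dict String Int :=
    answers.foldl (fun d weights => weights.foldl (fun d kv => d.modify kv.1 0 (· + kv.2)) d) PySem.Dict.empty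
  if scores.items = [] then "REALIST"
  else ((PySem.List.sorted2 scores.items (fun kv => -kv.2) (fun kv => kv.1) false).headD ("", 0)).1

-- ===== PORT B =====
-- total(key) = sum(v for k, v in pairs if k == key)
def pvTotal (pairs : List (String × Int)) (key : String) : Int :=
  ((pairs.filter (fun kv => kv.1 == key)).map (fun kv => kv.2)).sum

-- pairs = [kv for w in answers for kv in w.items()]; best = max(total(k) …); min(k … if total(k) == best)
-- max()/min() on nonempty generators, guarded by the emptiness test, so getD's defaults are unreachable
def score_from_answers_py_alt (answers : List (List (String × Int))) : String :=
  let pairs : List (String × Int) := answers.flatMap (fun weights => weights)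
  if pairs = [] then "REALIST"
  else
    let best : Int := (PySem.List.max? (pairs.map (fun kv => pvTotal pairs kv.1)) (fun x => x)).getD 0
    (PySem.List.min? ((pairs.filter (fun kv => pvTotal pairs kv.1 == best)).map (fun kv => kv.1)) (fun x => x)).getD ""

-- ===== PRECONDITION & SPEC =====
def Spec_score_from_answers_py (answers : List (List (String × Int))) (out : String) : Prop := out = score_from_answers_py_alt answers
instance (answers : List (List (String × Int))) (out : String) : Decidable (Spec_score_from_answers_py answers out) := by unfold Spec_score_from_answers_py; infer_instance

-- ===== CLAIM (what is proved, stated in full; the proofs are below) =====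
def Claim_equal_score_from_answers_py : Prop := ∀ (answers : List (List (String × Int))), Dom_score_from_answers_py answers → Spec_score_from_answers_py answers (score_from_answers_py answers)

-- ===== LEMMAS AND PROOFS =====

-- "m is at least as good as x" under A's ordering: higher total, or equal total and key ≤
def pvGood (m x : String × Int) : Prop := x.2 < m.2 ∨ (x.2 = m.2 ∧ m.1 ≤ x.1)

-- head of an insertBy-built list is computed by the min-selection fold, for ANY `before`
theorem head?_foldl_insertBy {α : Type} (before : α → α → Bool) (xs : List α) (acc : List α) :
    (xs.foldl (fun a x => PySem.List.insertBy before x a) acc).head? =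
      xs.foldl (fun o x => match o with
        | none => some x
        | some m => if before x m then some x else some m) acc.head? := by
  induction xs generalizing acc with
  | nil => rfl
  | cons x t ih =>
    simp only [List.foldl_cons]
    rw [ih]
    congr 1
    cases acc with
    | nil => rfl
    | cons y ys =>
      simp only [List.head?_cons]
      unfold PySem.List.insertBy
      by_cases h : before x y <;> simp [h]

-- A's sort-then-take-first equals the min-selection fold over the same items
theorem min2?_eq_head?_sorted2 {α κ₁ κ₂ : Type} [LT κ₁] [DecidableLT κ₁] [LT κ₂] [DecidableLT κ₂]
    (xs : List α) (k1 : α → κ₁) (k2 : α → κ₂) :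
    PySem.List.min2? xs k1 k2 = (PySem.List.sorted2 xs k1 k2 false).head? := by
  unfold PySem.List.min2? PySem.List.sorted2
  rw [head?_foldl_insertBy]
  rfl

-- pvGood is carried across the fold's pairwise comparisons
theorem pvGood_of_beat (m x a : String × Int) (hx : pvGood m x)
    (h : a.2 < x.2 ∨ (a.2 ≤ x.2 ∧ x.1 < a.1)) : pvGood m a := by
  unfold pvGood at *
  rcases hx with h1 | ⟨h1, h2⟩
  · rcases h with h3 | ⟨h3, _⟩ <;> exact Or.inl (by omega)
  · rcases h with h3 | ⟨h3, h4⟩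
    · exact Or.inl (by omega)
    · rcases lt_or_eq_of_le h3 with h5 | h5
      · exact Or.inl (by omega)
      · exact Or.inr ⟨by omega, le_of_lt (lt_of_le_of_lt h2 h4)⟩

theorem pvGood_of_keep (m a x : String × Int) (ha : pvGood m a)
    (h : x.2 < a.2 ∨ (x.2 = a.2 ∧ a.1 ≤ x.1)) : pvGood m x := by
  unfold pvGood at *
  rcases ha with h1 | ⟨h1, h2⟩
  · rcases h with h3 | ⟨h3, _⟩ <;> exact Or.inl (by omega)
  · rcases h with h3 | ⟨h3, h4⟩
    · exact Or.inl (by omega)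
    · exact Or.inr ⟨by omega, le_trans h2 h4⟩

theorem pvGood_refl (x : String × Int) : pvGood x x := Or.inr ⟨rfl, le_refl _⟩

-- the generic min-selection fold returns an element `good` against everything it saw
theorem minfold_good {α : Type} {good : α → α → Prop} {ltb : α → α → Bool}
    (hbeat : ∀ m x a, good m x → ltb x a = true → good m a)
    (hkeep : ∀ m a x, good m a → ltb x a = false → good m x)
    (hrefl : ∀ x, good x x)
    (xs : List α) (acc : Option α) (m : α)
    (h : xs.foldl (fun acc x => match acc with
        | none => some x
        | some mm => if ltb x mm then some x else some mm) acc = some m) :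
    (acc = some m ∨ m ∈ xs) ∧ (∀ x ∈ xs, good m x) ∧ (∀ a, acc = some a → good m a) := by
  induction xs generalizing acc with
  | nil =>
    simp only [List.foldl_nil] at h
    refine ⟨Or.inl h, by simp, ?_⟩
    intro a ha
    rw [h] at ha
    injection ha with e
    rw [← e]
    exact hrefl m
  | cons x t ih =>
    simp only [List.foldl_cons] at h
    cases acc with
    | none =>
      obtain ⟨hmem, hall, hacc⟩ := ih (some x) h
      have hx : good m x := hacc x rfl
      refine ⟨Or.inr ?_, ?_, by simp⟩
      · rcases hmem with h' | h'
        · injection h' with e; rw [← e]; exact List.mem_cons_self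
        · exact List.mem_cons_of_mem _ h'
      · intro y hy
        rcases List.mem_cons.mp hy with rfl | hy'
        · exact hx
        · exact hall y hy'
    | some a =>
      cases hlt : ltb x a with
      | true =>
        simp only [hlt, if_true] at h
        obtain ⟨hmem, hall, hacc⟩ := ih (some x) h
        have hx : good m x := hacc x rfl
        have hga : good m a := hbeat m x a hx hlt
        refine ⟨?_, ?_, ?_⟩
        · rcases hmem with h' | h'
          · injection h' with e; exact Or.inr (by rw [← e]; exact List.mem_cons_self)
          · exact Or.inr (List.mem_cons_of_mem _ h')
        · intro y hy
          rcases List.mem_cons.mp hy with rfl | hy'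
          · exact hx
          · exact hall y hy'
        · intro b hb; injection hb with e; rw [← e]; exact hga
      | false =>
        simp only [hlt] at h
        obtain ⟨hmem, hall, hacc⟩ := ih (some a) h
        have hga : good m a := hacc a rfl
        have hgx : good m x := hkeep m a x hga hlt
        refine ⟨?_, ?_, ?_⟩
        · rcases hmem with h' | h'
          · exact Or.inl h'
          · exact Or.inr (List.mem_cons_of_mem _ h')
        · intro y hy
          rcases List.mem_cons.mp hy with rfl | hy'
          · exact hgx
          · exact hall y hy'
        · exact hacc

-- A's min-selection element under the key (-value, key) is pvGood against every item
theorem min2?_good (xs : List (String × Int)) (m : String × Int)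
    (h : PySem.List.min2? xs (fun kv => -kv.2) (fun kv => kv.1) = some m) :
    m ∈ xs ∧ ∀ x ∈ xs, pvGood m x := by
  unfold PySem.List.min2? at h
  have key := minfold_good (good := pvGood) ?hb ?hk pvGood_refl xs none m h
  · exact ⟨key.1.resolve_left (by simp), key.2.1⟩
  case hb =>
    intro mm x a hx hlt
    simp only [Bool.or_eq_true, Bool.and_eq_true, Bool.not_eq_eq_eq_not, Bool.not_true,
      decide_eq_true_eq, decide_eq_false_iff_not] at hlt
    apply pvGood_of_beat mm x a hx
    rcases hlt with h1 | ⟨h1, h2⟩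
    · exact Or.inl (by omega)
    · exact Or.inr ⟨by omega, h2⟩
  case hk =>
    intro mm a x ha hlt
    simp only [Bool.or_eq_false_iff, Bool.and_eq_false_iff, Bool.not_eq_false',
      decide_eq_false_iff_not, decide_eq_true_eq] at hlt
    apply pvGood_of_keep mm a x ha
    obtain ⟨h1, h2⟩ := hlt
    rcases h2 with h2 | h2
    · exact Or.inl (by omega)
    · rcases lt_or_eq_of_le (show x.2 ≤ a.2 by omega) with h3 | h3
      · exact Or.inl h3
      · exact Or.inr ⟨h3, le_of_not_gt h2⟩

-- unfolding pvTotal over a cons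
theorem pvTotal_cons (kv : String × Int) (t : List (String × Int)) (k : String) :
    pvTotal (kv :: t) k = (if kv.1 = k then kv.2 else 0) + pvTotal t k := by
  unfold pvTotal
  by_cases h : kv.1 = k <;> simp [h]

-- A's aggregation dict looks up to B's brute-force total
theorem getD_modify_fold (l : List (String × Int)) (d : PySem.Dict String Int) (k : String) :
    (l.foldl (fun d kv => d.modify kv.1 0 (· + kv.2)) d).getD k 0 = d.getD k 0 + pvTotal l k := by
  induction l generalizing d with
  | nil => simp [pvTotal]
  | cons kv t ih =>
    simp only [List.foldl_cons]
    rw [ih, PySem.Dict.getD_modify, pvTotal_cons]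
    by_cases h : k = kv.1
    · subst h
      simp
      ring
    · rw [if_neg h, if_neg (fun hh : kv.1 = k => h hh.symm)]
      ring

-- the aggregation dict's key list is the distinct flattened keys
theorem keys_modify_fold (l : List (String × Int)) :
    (l.foldl (fun d kv => d.modify kv.1 0 (· + kv.2)) PySem.Dict.empty).keys
      = PySem.Set.ofList (l.map (fun kv => kv.1)) := by
  have h := PySem.Dict.keys_foldl_modify_key l (fun kv => kv.1) 0
    (fun _ kv => (· + kv.2)) PySem.Dict.empty
  simpa [PySem.Dict.keys_empty, PySem.Set.update_nil_left] using h

theorem nodup_keys_modify_fold (l : List (String × Int)) :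
    (l.foldl (fun d kv => d.modify kv.1 0 (· + kv.2)) PySem.Dict.empty).keys.Nodup :=
  PySem.Dict.nodup_keys_foldl_modify_key l (fun kv => kv.1) 0 (fun _ kv => (· + kv.2))
    PySem.Dict.empty (by simp [PySem.Dict.keys_empty])

-- ofList is nil only on nil
theorem ofList_eq_nil_iff (xs : List String) : PySem.Set.ofList xs = [] ↔ xs = [] := by
  constructor
  · intro h
    cases xs with
    | nil => rfl
    | cons x t =>
      have : x ∈ PySem.Set.ofList (x :: t) := (PySem.Set.mem_ofList _ _).mpr List.mem_cons_self
      rw [h] at this; cases this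
  · rintro rfl; rfl

-- ===== VERDICT (by name: the statement is the Claim_ definition above) =====
theorem score_from_answers_py_spec : Claim_equal_score_from_answers_py := by
  intro answers _
  unfold Spec_score_from_answers_py score_from_answers_py score_from_answers_py_alt
  set P : List (String × Int) := answers.flatMap (fun weights => weights) with hP
  have hfold : answers.foldl (fun d weights => weights.foldl (fun d kv => d.modify kv.1 0 (· + kv.2)) d) PySem.Dict.empty
      = P.foldl (fun d kv => d.modify kv.1 0 (· + kv.2)) PySem.Dict.empty := by
    rw [hP, List.foldl_flatMap]
  set D := P.foldl (fun d kv => d.modify kv.1 0 (· + kv.2)) PySem.Dict.empty with hD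
  have hkeys : D.keys = PySem.Set.ofList (P.map (fun kv => kv.1)) := keys_modify_fold P
  have hnodup : D.keys.Nodup := nodup_keys_modify_fold P
  have hgetD : ∀ k, D.getD k 0 = pvTotal P k := by
    intro k; rw [hD, getD_modify_fold]; simp [PySem.Dict.getD_empty]
  have hitems : D.items = D.keys.map (fun k => (k, pvTotal P k)) := by
    rw [PySem.Dict.items_eq_map_keys D hnodup 0]
    exact List.map_congr_left (fun k _ => by rw [hgetD k])
  rw [hfold]
  by_cases hPnil : P = []
  · have : D.items = [] := by
      rw [hitems, hkeys, hPnil]; rfl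
    simp [this, hPnil]
  · have hKnil : D.keys ≠ [] := by
      rw [hkeys]
      intro h
      exact hPnil (List.map_eq_nil_iff.mp ((ofList_eq_nil_iff _).mp h))
    have hInil : D.items ≠ [] := by
      rw [hitems]; simpa using hKnil
    rw [if_neg hInil, if_neg hPnil]
    -- A's side: the min-selection element m over the items
    rw [List.headD_eq_head?_getD, ← min2?_eq_head?_sorted2]
    have hmin2ne : PySem.List.min2? D.items (fun kv => -kv.2) (fun kv => kv.1) ≠ none := by
      rw [min2?_eq_head?_sorted2]
      intro h
      have hp := PySem.List.sorted2_perm D.items (fun kv => -kv.2) (fun kv => kv.1) false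
      rw [List.head?_eq_none_iff.mp h] at hp
      exact hInil hp.symm.eq_nil
    obtain ⟨m, hm⟩ := Option.ne_none_iff_exists'.mp hmin2ne
    obtain ⟨hmmem, hmall⟩ := min2?_good D.items m hm
    -- membership facts about m
    have hmkey : m.1 ∈ P.map (fun kv => kv.1) := by
      have : m.1 ∈ D.keys := by
        rw [hitems] at hmmem
        obtain ⟨k, hk, hkeq⟩ := List.mem_map.mp hmmem
        rw [← hkeq]; exact hk
      rw [hkeys] at this; exact (PySem.Set.mem_ofList _ _).mp this
    have hmval : m.2 = pvTotal P m.1 := by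
      rw [hitems] at hmmem
      obtain ⟨k, _, hkeq⟩ := List.mem_map.mp hmmem
      rw [← hkeq]
    have hgood : ∀ k ∈ P.map (fun kv => kv.1), pvGood m (k, pvTotal P k) := by
      intro k hk
      apply hmall
      rw [hitems]
      exact List.mem_map.mpr ⟨k, by rw [hkeys]; exact (PySem.Set.mem_ofList _ _).mpr hk, rfl⟩
    -- B's side: best, then min key
    set vals := P.map (fun kv => pvTotal P kv.1) with hvals
    have hvne : vals ≠ [] := by rw [hvals]; simpa using hPnil
    have hmaxne : PySem.List.max? vals (fun x => x) ≠ none := by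
      rw [Ne, PySem.List.max?_eq_none_iff]; exact hvne
    obtain ⟨b, hb⟩ := Option.ne_none_iff_exists'.mp hmaxne
    have hbmem := PySem.List.max?_mem hb
    have hbmax := PySem.List.max?_isMax hb
    -- best = m.2
    have hble : b ≤ m.2 := by
      obtain ⟨kv0, hkv0, hkv0eq⟩ := List.mem_map.mp hbmem
      have := hgood kv0.1 (List.mem_map.mpr ⟨kv0, hkv0, rfl⟩)
      rcases this with h1 | ⟨h1, _⟩
      · simp only at h1; omega
      · simp only at h1; omega
    have hbge : m.2 ≤ b := by
      obtain ⟨kv1, hkv1, hkv1eq⟩ := List.mem_map.mp hmkey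
      have := hbmax (pvTotal P kv1.1) (List.mem_map.mpr ⟨kv1, hkv1, rfl⟩)
      rw [hkv1eq, ← hmval] at this
      exact this
    have hbeq : b = m.2 := le_antisymm hble hbge
    -- the filtered key list
    set F := (P.filter (fun kv => pvTotal P kv.1 == b)).map (fun kv => kv.1) with hF
    have hmF : m.1 ∈ F := by
      obtain ⟨kv1, hkv1, hkv1eq⟩ := List.mem_map.mp hmkey
      refine List.mem_map.mpr ⟨kv1, List.mem_filter.mpr ⟨hkv1, ?_⟩, hkv1eq⟩
      rw [beq_iff_eq, hkv1eq, ← hmval, hbeq]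
    have hFne : F ≠ [] := fun h => by rw [h] at hmF; cases hmF
    have hminne : PySem.List.min? F (fun x => x) ≠ none := by
      rw [Ne, PySem.List.min?_eq_none_iff]; exact hFne
    obtain ⟨r, hr⟩ := Option.ne_none_iff_exists'.mp hminne
    have hrmem := PySem.List.min?_mem hr
    have hrmin := PySem.List.min?_isMin hr
    -- r = m.1
    have hrle : r ≤ m.1 := hrmin m.1 hmF
    have hrge : m.1 ≤ r := by
      obtain ⟨kv2, hkv2, hkv2eq⟩ := List.mem_map.mp hrmem
      have hkv2f := List.mem_filter.mp hkv2
      have hrtot : pvTotal P r = b := by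
        rw [← hkv2eq]; exact beq_iff_eq.mp hkv2f.2
      have := hgood r (List.mem_map.mpr ⟨kv2, hkv2f.1, hkv2eq⟩)
      rcases this with h1 | ⟨_, h2⟩
      · simp only at h1; rw [hrtot, hbeq] at h1; omega
      · exact h2
    have : m.1 = r := le_antisymm hrge hrle
    simp only [hm, hb, Option.getD_some, ← hF, hr]
    exact this
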